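-- pv_equiv track=rewrite | github.com/zlcython-by-zlc1003/old-windows-bf | ccc/test/Arranging-Books.py | lms
-- ===== SOURCE A (Python) =====
-- def lms(userin):
--     l,m,s=0,0,0
--     for i in userin:
--         if i.upper()=='L':
--             l+=1
--             continue
--         elif i.upper()=='M':
--             m+=1
--             continue
--         elif i.upper()=='S':
--             s+=1
--             continue
--     return (('L' * l)+('M' * m)+('S' * s))
-- ===== SOURCE B (Python) =====
-- def lms(userin):
--     kept = [c.upper() for c in userin if c.upper() in ('L', 'M', 'S')]
--     return ''.join(sorted(kept))
-- ===== Notes on version B (the rewrite author's own statement) =====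
-- stated objective: alternative
-- what changed: Replaces A's single-pass counting loop with three accumulators by a filter-then-sort strategy: keep the uppercased L/M/S characters and sort them, which groups equal letters in L<M<S order without counting.
import Mathlib
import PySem

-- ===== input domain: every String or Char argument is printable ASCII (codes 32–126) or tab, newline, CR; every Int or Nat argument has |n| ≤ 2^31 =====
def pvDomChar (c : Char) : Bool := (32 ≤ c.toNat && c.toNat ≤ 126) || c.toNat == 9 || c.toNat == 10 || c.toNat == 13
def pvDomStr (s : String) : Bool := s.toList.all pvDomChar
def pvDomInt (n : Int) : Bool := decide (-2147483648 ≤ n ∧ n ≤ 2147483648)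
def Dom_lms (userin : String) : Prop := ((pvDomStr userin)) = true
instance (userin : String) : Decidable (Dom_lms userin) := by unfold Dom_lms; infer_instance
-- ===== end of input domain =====

-- B replaces A's single-pass counting loop by filter-then-sort: keep the
-- uppercased L/M/S characters and sort them (objective: alternative).

-- ===== PORT A =====
-- the for-loop with three counters, as structural recursion over the characters
def lmsLoop (cs : List Char) (l m s : Nat) : Nat × Nat × Nat :=
  match cs with
  | [] => (l, m, s)
  | c :: rest =>
    if PySem.Chars.upper [c] = ['L'] then lmsLoop rest (l + 1) m s
    else if PySem.Chars.upper [c] = ['M'] then lmsLoop rest l (m + 1) s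
    else if PySem.Chars.upper [c] = ['S'] then lmsLoop rest l m (s + 1)
    else lmsLoop rest l m s

def lms (userin : String) : String :=
  let t := lmsLoop userin.toList 0 0 0
  String.ofList (List.replicate t.1 'L' ++ List.replicate t.2.1 'M' ++ List.replicate t.2.2 'S')

-- ===== PORT B =====
def lms_alt (userin : String) : String :=
  let kept := (userin.toList.map (fun c => String.ofList (PySem.Chars.upper [c]))).filter
      (fun u => u == "L" || u == "M" || u == "S")
  String.join (PySem.List.sorted kept (fun x => x) false)

-- ===== PRECONDITION & SPEC =====
def Spec_lms (userin : String) (out : String) : Prop := out = lms_alt userin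
instance (userin : String) (out : String) : Decidable (Spec_lms userin out) := by unfold Spec_lms; infer_instance

-- ===== CLAIM (what is proved, stated in full; the proofs are below) =====
def Claim_equal_lms : Prop := ∀ (userin : String), Dom_lms userin → Spec_lms userin (lms userin)

-- ===== LEMMAS AND PROOFS =====

-- A's loop computes the counts of the three uppercased letters.
theorem lmsLoop_eq_counts (cs : List Char) (l m s : Nat) :
    lmsLoop cs l m s =
      (l + (cs.map (fun c => PySem.Chars.upper [c])).count ['L'],
       m + (cs.map (fun c => PySem.Chars.upper [c])).count ['M'],
       s + (cs.map (fun c => PySem.Chars.upper [c])).count ['S']) := by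
  induction cs generalizing l m s with
  | nil => simp [lmsLoop]
  | cons c rest ih =>
    simp only [lmsLoop, List.map_cons, List.count_cons]
    split_ifs with h1 h2 h3 <;> simp_all <;> omega

theorem le_LM : ("L" : String) ≤ "M" := by simp [String.le_iff_toList_le]; decide
theorem le_LS : ("L" : String) ≤ "S" := by simp [String.le_iff_toList_le]; decide
theorem le_MS : ("M" : String) ≤ "S" := by simp [String.le_iff_toList_le]; decide

theorem count_map_ofList (cs : List Char) (u : List Char) :
    ((cs.map (fun c => String.ofList (PySem.Chars.upper [c]))).count (String.ofList u))
      = (cs.map (fun c => PySem.Chars.upper [c])).count u := by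
  rw [show (fun c => String.ofList (PySem.Chars.upper [c]))
        = String.ofList ∘ (fun c => PySem.Chars.upper [c]) from rfl,
      ← List.map_map]
  exact List.count_map_of_injective _ _ (fun a b h => String.ofList_inj.mp h) _

-- the grouped replicate list is the sorted order of B's kept list
theorem sorted_kept (userin : String) :
    PySem.List.sorted
      ((userin.toList.map (fun c => String.ofList (PySem.Chars.upper [c]))).filter
        (fun u => u == "L" || u == "M" || u == "S")) (fun x => x) false =
      List.replicate ((userin.toList.map (fun c => PySem.Chars.upper [c])).count ['L']) "L" ++
      List.replicate ((userin.toList.map (fun c => PySem.Chars.upper [c])).count ['M']) "M" ++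
      List.replicate ((userin.toList.map (fun c => PySem.Chars.upper [c])).count ['S']) "S" := by
  apply PySem.List.sorted_id_eq_of_perm_of_pairwise
  · rw [List.perm_iff_count]
    intro a
    by_cases hL : a = "L"
    · subst hL
      rw [List.count_filter (by decide)]
      simp [List.count_replicate, ← count_map_ofList]
    · by_cases hM : a = "M"
      · subst hM
        rw [List.count_filter (by decide)]
        simp [List.count_replicate, ← count_map_ofList]
      · by_cases hS : a = "S"
        · subst hS
          rw [List.count_filter (by decide)]
          simp [List.count_replicate, ← count_map_ofList]
        · have h0 : a ∉ (userin.toList.map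
              (fun c => String.ofList (PySem.Chars.upper [c]))).filter
              (fun u => u == "L" || u == "M" || u == "S") := by
            intro hmem
            have := (List.mem_filter.mp hmem).2
            simp only [Bool.or_eq_true, beq_iff_eq] at this
            tauto
          simp [List.count_replicate, List.count_eq_zero.mpr h0]
          exact ⟨fun h => absurd h.symm hL, fun h => absurd h.symm hM,
            fun h => absurd h.symm hS⟩
  · simp only [List.pairwise_append, List.mem_replicate, List.mem_append,
      List.pairwise_replicate]
    refine ⟨⟨Or.inr le_rfl, Or.inr le_rfl, ?_⟩, Or.inr le_rfl, ?_⟩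
    · rintro a ⟨-, rfl⟩ b ⟨-, rfl⟩; exact le_LM
    · rintro a (⟨-, rfl⟩ | ⟨-, rfl⟩) b ⟨-, rfl⟩
      · exact le_LS
      · exact le_MS

-- ===== VERDICT (by name: the statement is the Claim_ definition above) =====
theorem lms_spec : Claim_equal_lms := by
  intro userin _
  unfold Spec_lms lms lms_alt
  simp only [lmsLoop_eq_counts, sorted_kept, Nat.zero_add]
  apply String.toList_inj.mp
  simp [List.map_replicate, List.flatten_append]
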